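-- pv_equiv track=rewrite | github.com/MConcoba/compiladores | homeworks/maquina_dulce/afd_dulce.py | maquina_dulce
-- ===== SOURCE A (Python) =====
-- def maquina_dulce(line):
--     state = 0
--     line_str = ' '.join(map(str, line))
--     transitions = {
--         0: {'5': 5, '10': 10, '25': 25},
--         5: {'5': 10, '10': 15, '25': 30},
--         10: {'5': 15, '10': 20, '25': 30},
--         15: {'5': 20, '10': 25, '25': 30},
--         20: {'5': 25, '10': 30, '25': 30},
--         25: {'5': 30, '10': 30, '25': 30},
--         30: {'5': 30, '10': 30, '25': 30},
--     }
--
--     for num in line: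
--         if num not in [5, 10, 25]:
--             return ('Los valores no son correctos', False)
--         transition = transitions[state]
--
--         state = transition.get(str(num), state)
--
--     if state == 30:
--         return (f'{line_str} => Entregar dulce', True)
--     else:
--         return (f'{line_str} => No entregar dulce', False)
-- ===== SOURCE B (Python) =====
-- def maquina_dulce(line):
--     # B: the DFA just saturates the running total at 30, so accept iff sum >= 30.
--     for num in line:
--         if num not in (5, 10, 25):
--             return ('Los valores no son correctos', False)
--     line_str = ' '.join(map(str, line))
--     if sum(line) >= 30:
--         return (f'{line_str} => Entregar dulce', True)
--     return (f'{line_str} => No entregar dulce', False)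
-- ===== Notes on version B (the rewrite author's own statement) =====
-- stated objective: simpler
-- what changed: Replaces the 7-state transition-table DFA with the observation that the automaton saturates the running coin total at 30, so acceptance is simply sum(line) >= 30 after a validity scan.
import Mathlib
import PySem

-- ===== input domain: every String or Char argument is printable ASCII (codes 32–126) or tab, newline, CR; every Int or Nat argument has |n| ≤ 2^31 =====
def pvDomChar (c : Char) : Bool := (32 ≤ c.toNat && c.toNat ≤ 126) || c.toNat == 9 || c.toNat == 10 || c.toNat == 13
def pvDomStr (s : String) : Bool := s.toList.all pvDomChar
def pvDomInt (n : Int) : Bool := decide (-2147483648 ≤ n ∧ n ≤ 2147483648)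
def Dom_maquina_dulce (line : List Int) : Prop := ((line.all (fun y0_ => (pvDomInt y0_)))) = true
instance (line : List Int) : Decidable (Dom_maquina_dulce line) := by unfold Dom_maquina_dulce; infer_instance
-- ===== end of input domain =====

-- B replaces A's 7-state transition-table DFA by a validity scan plus 'sum(line) >= 30' (simpler; same cost).

-- ===== PORT A =====
def mdTransitions : PySem.Dict Int (PySem.Dict String Int) :=
  PySem.Dict.ofList
    [ (0,  PySem.Dict.ofList [("5", 5),  ("10", 10), ("25", 25)]),
      (5,  PySem.Dict.ofList [("5", 10), ("10", 15), ("25", 30)]),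
      (10, PySem.Dict.ofList [("5", 15), ("10", 20), ("25", 30)]),
      (15, PySem.Dict.ofList [("5", 20), ("10", 25), ("25", 30)]),
      (20, PySem.Dict.ofList [("5", 25), ("10", 30), ("25", 30)]),
      (25, PySem.Dict.ofList [("5", 30), ("10", 30), ("25", 30)]),
      (30, PySem.Dict.ofList [("5", 30), ("10", 30), ("25", 30)]) ]

-- the 'for num in line' loop of A (line_str is computed before the loop in A)
def mdGo (line_str : String) (state : Int) : List Int → String × Bool
  | [] =>
      if state == 30 then (line_str ++ " => Entregar dulce", true)
      else (line_str ++ " => No entregar dulce", false)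
  | num :: rest =>
      if ¬ (num = 5 ∨ num = 10 ∨ num = 25) then ("Los valores no son correctos", false)
      else
        -- transitions[state]: state is always a key of mdTransitions here
        let transition := (mdTransitions.get? state).getD PySem.Dict.empty
        mdGo line_str (transition.getD (PySem.Int.toStr num) state) rest

def maquina_dulce (line : List Int) : String × Bool :=
  let line_str := PySem.Str.join " " (line.map PySem.Int.toStr)
  mdGo line_str 0 line

-- ===== PORT B =====
def maquina_dulce_alt (line : List Int) : String × Bool :=
  if line.any (fun num => ¬ (num = 5 ∨ num = 10 ∨ num = 25)) then
    ("Los valores no son correctos", false)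
  else
    let line_str := PySem.Str.join " " (line.map PySem.Int.toStr)
    if line.foldl (· + ·) 0 ≥ 30 then (line_str ++ " => Entregar dulce", true)
    else (line_str ++ " => No entregar dulce", false)

-- ===== PRECONDITION & SPEC =====
def Spec_maquina_dulce (line : List Int) (out : String × Bool) : Prop := out = maquina_dulce_alt line
instance (line : List Int) (out : String × Bool) : Decidable (Spec_maquina_dulce line out) := by unfold Spec_maquina_dulce; infer_instance

-- ===== CLAIM (what is proved, stated in full; the proofs are below) =====
def Claim_equal_maquina_dulce : Prop := ∀ (line : List Int), Dom_maquina_dulce line → Spec_maquina_dulce line (maquina_dulce line)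

-- ===== LEMMAS AND PROOFS =====

lemma md_foldl_add (l : List Int) (s : Int) : l.foldl (· + ·) s = s + l.foldl (· + ·) 0 := by
  induction l generalizing s with
  | nil => simp
  | cons x xs ih => simp only [List.foldl_cons]; rw [ih (s + x), ih (0 + x)]; ring

lemma md_sum_nonneg (l : List Int) (h : ∀ x ∈ l, x = 5 ∨ x = 10 ∨ x = 25) :
    0 ≤ l.foldl (· + ·) 0 := by
  induction l with
  | nil => simp
  | cons x xs ih =>
      have hx := h x (by simp)
      have hxs := ih (fun y hy => h y (by simp [hy]))
      rw [List.foldl_cons, md_foldl_add]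
      rcases hx with h5 | h10 | h25 <;> omega

lemma mdGo_invalid (ls : String) (state : Int) (l : List Int)
    (h : ∃ x ∈ l, ¬ (x = 5 ∨ x = 10 ∨ x = 25)) :
    mdGo ls state l = ("Los valores no son correctos", false) := by
  induction l generalizing state with
  | nil => simp at h
  | cons x xs ih =>
      by_cases hx : x = 5 ∨ x = 10 ∨ x = 25
      · have : ∃ y ∈ xs, ¬ (y = 5 ∨ y = 10 ∨ y = 25) := by
          rcases h with ⟨y, hy, hny⟩
          rcases List.mem_cons.mp hy with rfl | hy'
          · exact absurd hx hny
          · exact ⟨y, hy', hny⟩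
        simp only [mdGo, hx, not_true_eq_false, if_false]
        exact ih _ this
      · simp [mdGo, hx]

lemma mdGo_step (ls : String) (state num : Int) (xs : List Int)
    (h : num = 5 ∨ num = 10 ∨ num = 25) :
    mdGo ls state (num :: xs) =
      mdGo ls (((mdTransitions.get? state).getD PySem.Dict.empty).getD (PySem.Int.toStr num) state) xs := by
  simp [mdGo, h]

lemma mdStep_val : ∀ s ∈ ([0, 5, 10, 15, 20, 25, 30] : List Int), ∀ n ∈ ([5, 10, 25] : List Int),
    ((mdTransitions.get? s).getD PySem.Dict.empty).getD (PySem.Int.toStr n) s = min (s + n) 30 := by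
  decide

lemma mdStep_mem : ∀ s ∈ ([0, 5, 10, 15, 20, 25, 30] : List Int), ∀ n ∈ ([5, 10, 25] : List Int),
    min (s + n) 30 ∈ ([0, 5, 10, 15, 20, 25, 30] : List Int) := by
  decide

lemma mdGo_valid (ls : String) (l : List Int) :
    ∀ state ∈ ([0, 5, 10, 15, 20, 25, 30] : List Int),
    (∀ x ∈ l, x = 5 ∨ x = 10 ∨ x = 25) →
    mdGo ls state l =
      (if state + l.foldl (· + ·) 0 ≥ 30 then (ls ++ " => Entregar dulce", true)
       else (ls ++ " => No entregar dulce", false)) := by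
  induction l with
  | nil =>
      intro state hs _
      fin_cases hs <;> simp [mdGo]
  | cons x xs ih =>
      intro state hs hval
      have hx : x = 5 ∨ x = 10 ∨ x = 25 := hval x (by simp)
      have hx' : x ∈ ([5, 10, 25] : List Int) := by simpa using hx
      have hxs : ∀ y ∈ xs, y = 5 ∨ y = 10 ∨ y = 25 := fun y hy => hval y (by simp [hy])
      have hsum := md_sum_nonneg xs hxs
      rw [mdGo_step ls state x xs hx, mdStep_val state hs x hx',
        ih _ (mdStep_mem state hs x hx') hxs, List.foldl_cons, md_foldl_add xs (0 + x)]
      have hs1 : (0:Int) ≤ state ∧ state ≤ 30 := by fin_cases hs <;> norm_num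
      have hx5 : (5:Int) ≤ x := by rcases hx with rfl | rfl | rfl <;> norm_num
      split_ifs with h1 h2 <;> first | rfl | (exfalso; omega)

-- ===== VERDICT (by name: the statement is the Claim_ definition above) =====
theorem maquina_dulce_spec : Claim_equal_maquina_dulce := by
  intro line _
  unfold Spec_maquina_dulce maquina_dulce maquina_dulce_alt
  by_cases h : line.any (fun num => ¬ (num = 5 ∨ num = 10 ∨ num = 25))
  · rw [if_pos h]
    exact mdGo_invalid _ _ _ (by simpa using h)
  · rw [if_neg h]
    have hval : ∀ x ∈ line, x = 5 ∨ x = 10 ∨ x = 25 := by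
      intro x hx
      by_contra hc
      exact h (List.any_eq_true.mpr ⟨x, hx, by simpa using hc⟩)
    rw [mdGo_valid _ _ 0 (by norm_num) hval]
    norm_num
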